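-- pv_equiv track=rewrite | github.com/arsenic02/vezbanjeAI | l1_z3.py | uredi
-- ===== SOURCE A (Python) =====
-- def uredi(elementi, N, vrednost):
--     rezultat = []
--     for i in range(len(elementi)):
--         if i < N:
--             rezultat.append(elementi[i] + vrednost)
--         else:
--             rezultat.append(elementi[i] - vrednost)
--     return rezultat
-- ===== SOURCE B (Python) =====
-- def uredi(elementi, N, vrednost):
--     # Uniformly subtract, then repair the prefix: e + v == (e - v) + 2*v.
--     rezultat = [e - vrednost for e in elementi]
--     popravka = 2 * vrednost
--     k = N
--     for j in range(len(rezultat)):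
--         if k <= 0:
--             break
--         rezultat[j] += popravka
--         k -= 1
--     return rezultat
-- ===== Notes on version B (the rewrite author's own statement) =====
-- stated objective: alternative
-- what changed: Instead of choosing +v or -v per index, B uniformly subtracts vrednost from every element in one pass and then repairs the first N slots in place by adding the correction 2*vrednost (since e+v = (e-v)+2v), counting N down to zero.
import Mathlib
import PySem

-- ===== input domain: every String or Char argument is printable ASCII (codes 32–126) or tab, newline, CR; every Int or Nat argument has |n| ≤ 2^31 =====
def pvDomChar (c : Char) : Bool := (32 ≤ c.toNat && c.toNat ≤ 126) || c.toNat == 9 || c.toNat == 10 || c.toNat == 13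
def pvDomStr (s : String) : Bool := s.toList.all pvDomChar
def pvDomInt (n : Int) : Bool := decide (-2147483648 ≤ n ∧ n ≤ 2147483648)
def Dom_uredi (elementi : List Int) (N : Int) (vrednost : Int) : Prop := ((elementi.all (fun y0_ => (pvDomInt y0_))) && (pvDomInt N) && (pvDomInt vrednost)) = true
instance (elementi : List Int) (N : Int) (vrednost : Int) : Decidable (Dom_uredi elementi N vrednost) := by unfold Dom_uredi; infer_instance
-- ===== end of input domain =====

-- B replaces A's per-index choice of +v / -v by a uniform subtract-v pass followed by an
-- in-place prefix correction adding 2*v to the first N slots (e+v = (e-v)+2v); same cost, different decomposition.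


-- ===== PORT A =====
def uredi (elementi : List Int) (N : Int) (vrednost : Int) : List Int :=
  (PySem.List.pyRange 0 elementi.length 1).foldl
    (fun rezultat i =>
      if i < N then rezultat ++ [PySem.List.pyGetD elementi i 0 + vrednost]
      else rezultat ++ [PySem.List.pyGetD elementi i 0 - vrednost]) []

-- ===== PORT B =====
-- Source B's prefix-repair loop: walk the list, adding c to each slot while the counter k is positive
-- (the 'if k <= 0: break' exit), leaving the rest untouched.
def urediFix (k : Int) (c : Int) : List Int → List Int
  | [] => []
  | x :: xs => if k ≤ 0 then x :: xs else (x + c) :: urediFix (k - 1) c xs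

def uredi_alt (elementi : List Int) (N : Int) (vrednost : Int) : List Int :=
  urediFix N (2 * vrednost) (elementi.map (fun e => e - vrednost))

-- ===== PRECONDITION & SPEC =====
def Spec_uredi (elementi : List Int) (N : Int) (vrednost : Int) (out : List Int) : Prop := out = uredi_alt elementi N vrednost
instance (elementi : List Int) (N : Int) (vrednost : Int) (out : List Int) : Decidable (Spec_uredi elementi N vrednost out) := by unfold Spec_uredi; infer_instance

-- ===== CLAIM (what is proved, stated in full; the proofs are below) =====
def Claim_equal_uredi : Prop := ∀ (elementi : List Int) (N : Int) (vrednost : Int), Dom_uredi elementi N vrednost → Spec_uredi elementi N vrednost (uredi elementi N vrednost)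

-- ===== LEMMAS AND PROOFS =====

theorem urediFix_nonpos (k c : Int) (xs : List Int) (h : k ≤ 0) : urediFix k c xs = xs := by
  cases xs with
  | nil => rfl
  | cons x xs => simp [urediFix, h]

-- core fact: the per-index branch over range(len) equals the uniform pass plus prefix correction
theorem uredi_core (xs : List Int) (N v : Int) :
    (List.range xs.length).map
      (fun (j : Nat) => if (j : Int) < N then xs.getD j 0 + v else xs.getD j 0 - v) =
    urediFix N (2 * v) (xs.map (fun e => e - v)) := by
  induction xs generalizing N with
  | nil => simp [urediFix]
  | cons x xs ih =>
    rw [List.length_cons, List.range_succ_eq_map, List.map_cons, List.map_map]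
    have htail :
        (List.range xs.length).map
          ((fun (j : Nat) => if (j : Int) < N then (x :: xs).getD j 0 + v else (x :: xs).getD j 0 - v)
            ∘ Nat.succ) =
        (List.range xs.length).map
          (fun (j : Nat) => if (j : Int) < N - 1 then xs.getD j 0 + v else xs.getD j 0 - v) := by
      apply List.map_congr_left
      intro j _
      simp only [Function.comp, List.getD_cons_succ]
      have h : ((j.succ : Int) < N) ↔ ((j : Int) < N - 1) := by push_cast; omega
      simp only [h]
    rw [htail, ih]
    by_cases hN : 0 < N
    · have h0 : ((0 : Nat) : Int) < N := by exact_mod_cast hN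
      have hk : ¬ N ≤ 0 := by omega
      simp only [if_pos h0, List.getD_cons_zero, List.map_cons, urediFix, if_neg hk]
      congr 1
      ring
    · have h0 : ¬ ((0 : Nat) : Int) < N := by exact_mod_cast hN
      have hk : N ≤ 0 := by omega
      rw [urediFix_nonpos _ _ _ (by omega : N - 1 ≤ 0)]
      simp only [if_neg h0, List.getD_cons_zero, List.map_cons, urediFix, if_pos hk]

-- ===== VERDICT (by name: the statement is the Claim_ definition above) =====
theorem uredi_spec : Claim_equal_uredi := by
  intro elementi N vrednost _
  simp only [Spec_uredi, uredi, uredi_alt]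
  have hfun : (fun (rezultat : List Int) (i : Int) =>
      if i < N then rezultat ++ [PySem.List.pyGetD elementi i 0 + vrednost]
      else rezultat ++ [PySem.List.pyGetD elementi i 0 - vrednost]) =
      (fun rezultat i => rezultat ++
        [if i < N then PySem.List.pyGetD elementi i 0 + vrednost
         else PySem.List.pyGetD elementi i 0 - vrednost]) := by
    funext r i; split <;> rfl
  rw [hfun, PySem.List.foldl_append_singleton_eq_map, PySem.List.pyRange_one]
  simp only [Int.sub_zero, Int.toNat_natCast, List.map_map, List.nil_append]
  rw [← uredi_core elementi N vrednost]
  apply List.map_congr_left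
  intro j _
  simp [PySem.List.pyGetD_natCast]
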